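-- pv_equiv track=rewrite | github.com/s3rvac/advent-of-code | 2023/11/aoc11_part2.py | get_coordinates_of_all_galaxies
-- ===== SOURCE A (Python) =====
-- def get_coordinates_of_all_galaxies(universe):
--     rows_to_expand, columns_to_expand = get_rows_and_columns_to_expand(universe)
--
--     coordinates = []
--     for x, row in enumerate(universe):
--         for y, c in enumerate(row):
--             if c == '#':
--                 coordinates.append(
--                     get_galaxy_coordinates_in_expanded_universe(
--                         rows_to_expand, columns_to_expand, x, y
--                     )
--                 )
--     return coordinates
--
-- def get_rows_and_columns_to_expand(universe):
--     rows_to_expand = [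
--         i for i, row in enumerate(universe) if row.count('#') == 0
--     ]
--
--     all_columns = [[row[i] for row in universe] for i in range(len(universe[0]))]
--     columns_to_expand = [
--         i for i, column in enumerate(all_columns) if column.count('#') == 0
--     ]
--
--     return rows_to_expand, columns_to_expand
--
-- def get_galaxy_coordinates_in_expanded_universe(rows_to_expand, columns_to_expand, x, y):
--     expansion_factor = 1_000_000
--
--     expanded_x = 0
--     for i in range(x):
--         expanded_x += expansion_factor if i in rows_to_expand else 1
--
--     expanded_y = 0
--     for i in range(y):
--         expanded_y += expansion_factor if i in columns_to_expand else 1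
--
--     return expanded_x, expanded_y
-- ===== SOURCE B (Python) =====
-- def count_below(values, limit):
--     return sum(1 for v in values if v < limit)
--
-- def get_coordinates_of_all_galaxies(universe):
--     # Closed form: an expanded coordinate is the original coordinate plus
--     # (factor - 1) for every empty row/column before it.
--     factor = 1_000_000
--     empty_rows = [i for i, row in enumerate(universe) if row.count('#') == 0]
--     empty_cols = [j for j in range(len(universe[0]))
--                   if all(row[j] != '#' for row in universe)]
--     return [(x + (factor - 1) * count_below(empty_rows, x),
--              y + (factor - 1) * count_below(empty_cols, y))
--             for x, row in enumerate(universe)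
--             for y, c in enumerate(row) if c == '#']
-- ===== Notes on version B (the rewrite author's own statement) =====
-- stated objective: alternative
-- what changed: Instead of accumulating 1-or-factor steps over range(x) and range(y) with a membership test per step, B computes each expanded coordinate in closed form as coordinate + (factor-1) * (number of empty rows/columns before it); Pre_ excludes inputs where A raises IndexError (empty grid, or a row shorter than the first row).
import Mathlib
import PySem

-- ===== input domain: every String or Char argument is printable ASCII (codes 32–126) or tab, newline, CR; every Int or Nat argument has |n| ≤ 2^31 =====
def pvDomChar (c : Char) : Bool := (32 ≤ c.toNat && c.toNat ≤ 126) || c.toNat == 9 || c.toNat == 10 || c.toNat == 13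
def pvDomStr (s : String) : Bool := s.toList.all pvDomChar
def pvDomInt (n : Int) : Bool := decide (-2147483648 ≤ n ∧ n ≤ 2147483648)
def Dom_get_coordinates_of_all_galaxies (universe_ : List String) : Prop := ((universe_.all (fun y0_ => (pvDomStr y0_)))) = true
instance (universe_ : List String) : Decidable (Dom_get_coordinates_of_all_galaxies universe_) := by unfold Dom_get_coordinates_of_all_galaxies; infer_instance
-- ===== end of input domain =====

-- B replaces A's per-galaxy rescanning loops by the closed form
-- "coordinate + (factor-1) * number of empty rows/columns before it" (objective: alternative).
-- Neither version mutates its argument.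

-- ===== PORT A =====
-- helper get_rows_and_columns_to_expand; Python's row[i] (a 1-char string) is ported as the
-- Char at i with default ' ': under Pre_ every index i < len(universe[0]) is in range for
-- every row, so the default is never read (Python raises IndexError there, excluded by Pre_).
def pv_get_rows_and_columns_to_expand (universe_ : List String) : List Int × List Int :=
  let rows_to_expand : List Int :=
    (PySem.List.enumerate universe_).foldl
      (fun acc p => if PySem.Str.count p.2 "#" == 0 then acc ++ [p.1] else acc) []
  let all_columns : List (List Char) :=
    (PySem.List.pyRange 0 (PySem.Str.len ((PySem.List.pyGet? universe_ 0).getD ""))).map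
      (fun i => universe_.map (fun row => (PySem.Str.pyGet? row i).getD ' '))
  let columns_to_expand : List Int :=
    (PySem.List.enumerate all_columns).foldl
      (fun acc p => if p.2.count '#' == 0 then acc ++ [p.1] else acc) []
  (rows_to_expand, columns_to_expand)

-- helper get_galaxy_coordinates_in_expanded_universe
def pv_get_galaxy_coordinates_in_expanded_universe
    (rows_to_expand columns_to_expand : List Int) (x y : Int) : Int × Int :=
  let expansion_factor : Int := 1000000
  let expanded_x :=
    (PySem.List.pyRange 0 x).foldl
      (fun a i => a + (if i ∈ rows_to_expand then expansion_factor else 1)) 0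
  let expanded_y :=
    (PySem.List.pyRange 0 y).foldl
      (fun a i => a + (if i ∈ columns_to_expand then expansion_factor else 1)) 0
  (expanded_x, expanded_y)

def get_coordinates_of_all_galaxies (universe_ : List String) : List (Int × Int) :=
  let rc := pv_get_rows_and_columns_to_expand universe_
  (PySem.List.enumerate universe_).foldl
    (fun acc p =>
      (PySem.List.enumerate p.2.toList).foldl
        (fun acc q =>
          if q.2 == '#' then
            acc ++ [pv_get_galaxy_coordinates_in_expanded_universe rc.1 rc.2 p.1 q.1]
          else acc) acc) []

-- ===== PORT B =====
-- helper count_below: sum(1 for v in values if v < limit)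
def pv_count_below (values : List Int) (limit : Int) : Int :=
  (values.countP (fun v => decide (v < limit)) : Int)

-- empty_rows = [i for i, row in enumerate(universe) if row.count('#') == 0]
def pv_alt_empty_rows (universe_ : List String) : List Int :=
  ((PySem.List.enumerate universe_).filter
    (fun p => PySem.Str.count p.2 "#" == 0)).map (fun p => p.1)

-- empty_cols = [j for j in range(len(universe[0])) if all(row[j] != '#' for row in universe)];
-- row[j] is ported with default ' ' exactly as on the A side (never read under Pre_)
def pv_alt_empty_cols (universe_ : List String) : List Int :=
  (PySem.List.pyRange 0 (PySem.Str.len ((PySem.List.pyGet? universe_ 0).getD ""))).filter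
    (fun j => universe_.all (fun row => (PySem.Str.pyGet? row j).getD ' ' != '#'))

def get_coordinates_of_all_galaxies_alt (universe_ : List String) : List (Int × Int) :=
  let empty_rows := pv_alt_empty_rows universe_
  let empty_cols := pv_alt_empty_cols universe_
  (PySem.List.enumerate universe_).flatMap (fun p =>
    ((PySem.List.enumerate p.2.toList).filter (fun q => q.2 == '#')).map
      (fun q => (p.1 + (1000000 - 1) * pv_count_below empty_rows p.1,
                 q.1 + (1000000 - 1) * pv_count_below empty_cols q.1)))

-- ===== PRECONDITION & SPEC =====
-- Pre_ excludes exactly the inputs where the Python A raises IndexError: the empty grid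
-- (universe[0]) and grids in which some row is shorter than the first row (row[i]).
def Pre_get_coordinates_of_all_galaxies (universe_ : List String) : Prop :=
  universe_ ≠ [] ∧ ∀ row ∈ universe_, (universe_.headD "").toList.length ≤ row.toList.length
instance (universe_ : List String) : Decidable (Pre_get_coordinates_of_all_galaxies universe_) := by
  unfold Pre_get_coordinates_of_all_galaxies; infer_instance

def pvWitness_get_coordinates_of_all_galaxies : List String := ["#.", ".#."]

def Spec_get_coordinates_of_all_galaxies (universe_ : List String) (out : List (Int × Int)) : Prop := out = get_coordinates_of_all_galaxies_alt universe_
instance (universe_ : List String) (out : List (Int × Int)) : Decidable (Spec_get_coordinates_of_all_galaxies universe_ out) := by unfold Spec_get_coordinates_of_all_galaxies; infer_instance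

-- ===== CLAIM (what is proved, stated in full; the proofs are below) =====
def Claim_equal_get_coordinates_of_all_galaxies : Prop := ∀ (universe_ : List String), Dom_get_coordinates_of_all_galaxies universe_ → Pre_get_coordinates_of_all_galaxies universe_ → Spec_get_coordinates_of_all_galaxies universe_ (get_coordinates_of_all_galaxies universe_)

-- ===== LEMMAS AND PROOFS =====

-- enumerate of a mapped list
theorem pv_enumerate_map {α β : Type} (f : α → β) (l : List α) : ∀ (s : Int),
    PySem.List.enumerate (l.map f) s = (PySem.List.enumerate l s).map (fun p => (p.1, f p.2)) := by
  induction l with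
  | nil => intro s; simp [PySem.List.enumerate_nil]
  | cons a l ih => intro s; simp [PySem.List.enumerate_cons, ih]

-- enumerate of pyRange 0 W pairs each element with itself
theorem pv_enumerate_pyRange (W : Int) :
    PySem.List.enumerate (PySem.List.pyRange 0 W) 0
      = (PySem.List.pyRange 0 W).map (fun j => (j, j)) := by
  apply List.ext_getElem
  · simp [PySem.List.length_enumerate]
  · intro k h1 h2
    simp [PySem.List.getElem_enumerate, PySem.List.getElem_pyRange_one]

-- A's columns_to_expand equals B's empty_cols, as lists
theorem pv_cols_eq (universe_ : List String) :
    (pv_get_rows_and_columns_to_expand universe_).2 = pv_alt_empty_cols universe_ := by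
  unfold pv_get_rows_and_columns_to_expand pv_alt_empty_cols
  simp only [PySem.List.foldl_append_if, List.nil_append]
  rw [pv_enumerate_map, pv_enumerate_pyRange]
  rw [List.filter_map, List.map_map, List.filter_map, List.map_map]
  simp only [Function.comp_def]
  rw [List.map_id']
  apply List.filter_congr
  intro j _
  rw [Bool.eq_iff_iff]
  simp [List.count_eq_zero, List.all_eq_true]

-- countP of (· < t+1) vs (· < t) on a Nodup list
theorem pv_countP_lt_add_one (L : List Int) (hnd : L.Nodup) (t : Int) :
    L.countP (fun e => decide (e < t + 1))
      = L.countP (fun e => decide (e < t)) + (if t ∈ L then 1 else 0) := by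
  induction L with
  | nil => simp
  | cons a L ih =>
    rcases List.nodup_cons.1 hnd with ⟨ha, hL⟩
    rw [List.countP_cons, List.countP_cons, ih hL]
    by_cases hat : a = t
    · subst hat
      have h1 : decide (a < a + 1) = true := decide_eq_true (by omega)
      have h2 : decide (a < a) = false := decide_eq_false (by omega)
      rw [h1, h2, if_pos (List.mem_cons_self), if_neg ha]
      simp
    · have h3 : decide (a < t + 1) = decide (a < t) := by
        have hiff : (a < t + 1) ↔ (a < t) := by omega
        simp [hiff]
      have h4 : (t ∈ a :: L) ↔ (t ∈ L) := by
        rw [List.mem_cons]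
        constructor
        · rintro (h | h)
          · exact absurd h.symm hat
          · exact h
        · exact Or.inr
      rw [h3, if_congr h4 rfl rfl]
      omega

-- the membership-weighted sum over range x is x + 999999 * (count of elements below x)
theorem pv_sum_mem (L : List Int) (hnd : L.Nodup) (hpos : ∀ e ∈ L, 0 ≤ e) : ∀ (x : Nat),
    ((List.range x).map (fun (k : Nat) => if (↑k : Int) ∈ L then (1000000 : Int) else 1)).sum
      = ↑x + (1000000 - 1) * (L.countP (fun e => decide (e < (↑x : Int))) : Int) := by
  intro x
  induction x with
  | zero =>
    have h0 : L.countP (fun e => decide (e < (0 : Int))) = 0 := by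
      rw [List.countP_eq_zero]
      intro e he
      simpa using not_lt.2 (hpos e he)
    simp [h0]
  | succ x ih =>
    rw [List.range_succ, List.map_append, List.sum_append]
    have hc : L.countP (fun e => decide (e < ((↑(x + 1) : Int))))
        = L.countP (fun e => decide (e < (↑x : Int))) + (if (↑x : Int) ∈ L then 1 else 0) := by
      have := pv_countP_lt_add_one L hnd (↑x : Int)
      rw [← this]
      congr 1
    rw [hc, ih]
    by_cases hm : (↑x : Int) ∈ L
    · simp only [hm, if_pos, List.map_cons, List.map_nil, List.sum_cons, List.sum_nil]
      push_cast
      ring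
    · simp only [hm, if_false, List.map_cons, List.map_nil, List.sum_cons, List.sum_nil]
      push_cast
      ring

-- A's per-coordinate loop equals B's closed form, for a Nodup nonnegative expansion list
theorem pv_loop_eq_formula (L : List Int) (hnd : L.Nodup) (hpos : ∀ e ∈ L, 0 ≤ e) (x : Nat) :
    (PySem.List.pyRange 0 (↑x)).foldl
        (fun a i => a + (if i ∈ L then (1000000 : Int) else 1)) 0
      = ↑x + (1000000 - 1) * pv_count_below L (↑x) := by
  rw [PySem.List.foldl_add, PySem.List.pyRange_zero_natCast, List.map_map, zero_add]
  unfold pv_count_below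
  simp only [Function.comp_def]
  exact pv_sum_mem L hnd hpos x

-- B's empty_rows list is Nodup with nonnegative elements
theorem pv_rows_nodup (universe_ : List String) : (pv_alt_empty_rows universe_).Nodup := by
  unfold pv_alt_empty_rows
  have hsub : (((PySem.List.enumerate universe_).filter
        (fun p => PySem.Str.count p.2 "#" == 0)).map (fun p => p.1)).Sublist
      ((PySem.List.enumerate universe_).map (fun p => p.1)) :=
    List.Sublist.map _ List.filter_sublist
  apply hsub.nodup
  rw [PySem.List.map_fst_enumerate]
  exact PySem.List.nodup_pyRange_one 0 _

theorem pv_rows_nonneg (universe_ : List String) :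
    ∀ e ∈ pv_alt_empty_rows universe_, 0 ≤ e := by
  intro e he
  unfold pv_alt_empty_rows at he
  rcases List.mem_map.1 he with ⟨p, hp, rfl⟩
  rcases (PySem.List.mem_enumerate_iff _ _ _).1 (List.mem_of_mem_filter hp) with ⟨k, hk, rfl⟩
  simp

-- B's empty_cols list is Nodup with nonnegative elements
theorem pv_cols_nodup (universe_ : List String) : (pv_alt_empty_cols universe_).Nodup := by
  unfold pv_alt_empty_cols
  exact List.filter_sublist.nodup (PySem.List.nodup_pyRange_one 0 _)

theorem pv_cols_nonneg (universe_ : List String) :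
    ∀ e ∈ pv_alt_empty_cols universe_, 0 ≤ e := by
  intro e he
  unfold pv_alt_empty_cols at he
  exact (PySem.List.mem_pyRange_one.1 (List.mem_of_mem_filter he)).1

-- A's rows_to_expand equals B's empty_rows, as lists
theorem pv_rows_eq (universe_ : List String) :
    (pv_get_rows_and_columns_to_expand universe_).1 = pv_alt_empty_rows universe_ := by
  unfold pv_get_rows_and_columns_to_expand pv_alt_empty_rows
  simp only [PySem.List.foldl_append_if, List.nil_append]

-- the two per-galaxy coordinate computations agree
theorem pv_coord_eq (universe_ : List String) (x y : Nat) :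
    pv_get_galaxy_coordinates_in_expanded_universe
        (pv_get_rows_and_columns_to_expand universe_).1
        (pv_get_rows_and_columns_to_expand universe_).2 (↑x) (↑y)
      = ((↑x : Int) + (1000000 - 1) * pv_count_below (pv_alt_empty_rows universe_) (↑x),
         (↑y : Int) + (1000000 - 1) * pv_count_below (pv_alt_empty_cols universe_) (↑y)) := by
  unfold pv_get_galaxy_coordinates_in_expanded_universe
  rw [pv_rows_eq, pv_cols_eq]
  rw [Prod.mk.injEq]
  exact ⟨pv_loop_eq_formula _ (pv_rows_nodup universe_) (pv_rows_nonneg universe_) x,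
         pv_loop_eq_formula _ (pv_cols_nodup universe_) (pv_cols_nonneg universe_) y⟩

-- ===== VERDICT (by name: the statement is the Claim_ definition above) =====
theorem get_coordinates_of_all_galaxies_spec : Claim_equal_get_coordinates_of_all_galaxies := by
  intro universe_ _hdom _hpre
  unfold Spec_get_coordinates_of_all_galaxies
  unfold get_coordinates_of_all_galaxies get_coordinates_of_all_galaxies_alt
  simp only [PySem.List.foldl_append_if, PySem.List.foldl_append_eq_flatMap, List.nil_append]
  rw [List.flatMap_def, List.flatMap_def]
  apply congrArg
  apply List.map_congr_left
  rintro p hp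
  rcases (PySem.List.mem_enumerate_iff _ _ _).1 hp with ⟨x, hx, rfl⟩
  apply List.map_congr_left
  rintro q hq
  have hq' := (List.mem_filter.1 hq).1
  rcases (PySem.List.mem_enumerate_iff _ _ _).1 hq' with ⟨y, hy, rfl⟩
  simp only [zero_add]
  exact pv_coord_eq universe_ x y
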